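-- pv_equiv track=rewrite | github.com/ScarletRedJoker/Nebula-Command | services/dashboard/services/studio_deployment_service.py | _find_main_file
-- ===== SOURCE A (Python) =====
-- from typing import Dict, Any, Optional, List, Generator, Tuple
--
-- def _find_main_file(files: List[Dict], language: str) -> str:
--     """Find the main entry point file"""
--     main_patterns = {
--         'python': ['main.py', 'app.py', 'run.py', '__main__.py'],
--         'nodejs': ['index.js', 'main.js', 'app.js', 'server.js'],
--         'rust': ['main.rs', 'lib.rs'],
--         'cpp': ['main.cpp', 'main.c'],
--         'csharp': ['Program.cs', 'Main.cs']
--     }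
--
--     patterns = main_patterns.get(language, main_patterns['python'])
--
--     for pattern in patterns:
--         for f in files:
--             if f.get('file_path', '').endswith(pattern):
--                 return f['file_path']
--
--     return patterns[0] if patterns else 'main.py'
-- ===== SOURCE B (Python) =====
-- def _find_main_file(files, language):
--     """Find the main entry point file (single pass over files, best-priority accumulator)"""
--     main_patterns = {
--         'python': ['main.py', 'app.py', 'run.py', '__main__.py'],
--         'nodejs': ['index.js', 'main.js', 'app.js', 'server.js'],
--         'rust': ['main.rs', 'lib.rs'],
--         'cpp': ['main.cpp', 'main.c'],
--         'csharp': ['Program.cs', 'Main.cs']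
--     }
--
--     patterns = main_patterns.get(language, main_patterns['python'])
--
--     best_idx = len(patterns)
--     best_path = None
--     for f in files:
--         path = f.get('file_path', '')
--         i = next((j for j, p in enumerate(patterns) if path.endswith(p)), len(patterns))
--         if i < best_idx:
--             best_idx = i
--             best_path = path
--
--     if best_path is not None:
--         return best_path
--     return patterns[0] if patterns else 'main.py'
-- ===== Notes on version B (the rewrite author's own statement) =====
-- stated objective: alternative
-- what changed: Replaces A's pattern-major nested scan (restarting over all files for each pattern) by a single pass over files that keeps the best (lowest) pattern index seen so far, with strict improvement so earlier files win ties.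
import Mathlib
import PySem

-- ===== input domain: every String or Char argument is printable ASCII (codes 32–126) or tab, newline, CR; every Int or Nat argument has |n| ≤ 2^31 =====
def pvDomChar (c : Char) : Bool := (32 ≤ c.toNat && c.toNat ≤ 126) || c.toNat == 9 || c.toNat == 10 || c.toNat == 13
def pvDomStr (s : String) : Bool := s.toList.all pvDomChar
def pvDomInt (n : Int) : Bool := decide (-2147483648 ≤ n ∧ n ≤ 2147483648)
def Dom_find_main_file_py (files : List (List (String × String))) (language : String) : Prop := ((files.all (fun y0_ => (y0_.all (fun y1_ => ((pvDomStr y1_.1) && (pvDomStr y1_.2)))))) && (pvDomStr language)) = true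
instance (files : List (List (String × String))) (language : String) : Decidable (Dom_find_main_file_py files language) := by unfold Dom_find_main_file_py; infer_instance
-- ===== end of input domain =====

-- B replaces A's pattern-major nested scan by a single pass over files keeping the
-- best (lowest) pattern index seen so far (strict improvement, so earlier files win ties);
-- same asymptotic cost, genuinely different traversal (objective: alternative).


-- ===== PORT A =====
-- inner loop: first file whose 'file_path' (default '') ends with pat; returning that path
-- is exact for f['file_path']: the guard fired with a nonempty literal pattern, so the key
-- is present and its value is the path.
def pvScanFilesA : List (List (String × String)) → String → Option String
  | [], _ => none
  | f :: fs, pat =>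
      let path := (PySem.Dict.mk f).getD "file_path" ""
      if PySem.Str.endswith path pat then some path else pvScanFilesA fs pat

-- outer loop over patterns
def pvScanPatternsA : List String → List (List (String × String)) → Option String
  | [], _ => none
  | p :: ps, files =>
      match pvScanFilesA files p with
      | some s => some s
      | none => pvScanPatternsA ps files

def find_main_file_py (files : List (List (String × String))) (language : String) : String :=
  let main_patterns : PySem.Dict String (List String) := PySem.Dict.ofList
    [("python", ["main.py", "app.py", "run.py", "__main__.py"]),
     ("nodejs", ["index.js", "main.js", "app.js", "server.js"]),
     ("rust", ["main.rs", "lib.rs"]),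
     ("cpp", ["main.cpp", "main.c"]),
     ("csharp", ["Program.cs", "Main.cs"])]
  let patterns := main_patterns.getD language (main_patterns.getD "python" [])
  match pvScanPatternsA patterns files with
  | some s => s
  | none => match patterns with
            | p :: _ => p
            | [] => "main.py"

-- ===== PORT B =====
def find_main_file_py_alt (files : List (List (String × String))) (language : String) : String :=
  let main_patterns : PySem.Dict String (List String) := PySem.Dict.ofList
    [("python", ["main.py", "app.py", "run.py", "__main__.py"]),
     ("nodejs", ["index.js", "main.js", "app.js", "server.js"]),
     ("rust", ["main.rs", "lib.rs"]),
     ("cpp", ["main.cpp", "main.c"]),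
     ("csharp", ["Program.cs", "Main.cs"])]
  let patterns := main_patterns.getD language (main_patterns.getD "python" [])
  -- single pass: (best_idx, best_path); next(...) over enumerate = List.findIdx
  let res := files.foldl (fun (acc : Nat × Option String) f =>
      let path := (PySem.Dict.mk f).getD "file_path" ""
      let i := patterns.findIdx (fun p => PySem.Str.endswith path p)
      if i < acc.1 then (i, some path) else acc) (patterns.length, none)
  match res.2 with
  | some s => s
  | none => match patterns with
            | p :: _ => p
            | [] => "main.py"

-- ===== PRECONDITION & SPEC =====
def Spec_find_main_file_py (files : List (List (String × String))) (language : String) (out : String) : Prop := out = find_main_file_py_alt files language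
instance (files : List (List (String × String))) (language : String) (out : String) : Decidable (Spec_find_main_file_py files language out) := by unfold Spec_find_main_file_py; infer_instance

-- ===== CLAIM (what is proved, stated in full; the proofs are below) =====
def Claim_equal_find_main_file_py : Prop := ∀ (files : List (List (String × String))) (language : String), Dom_find_main_file_py files language → Spec_find_main_file_py files language (find_main_file_py files language)

-- ===== LEMMAS AND PROOFS =====

-- path of a file dict
def pvPath (f : List (String × String)) : String := (PySem.Dict.mk f).getD "file_path" ""

-- index of the first pattern the path ends with (= pats.length if none)
def pvMIdx (pats : List String) (s : String) : Nat := pats.findIdx (fun p => PySem.Str.endswith s p)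

-- running minimum of pvMIdx over a list of paths
def pvKmin (pats : List String) (b : Nat) (l : List String) : Nat :=
  l.foldl (fun a s => min a (pvMIdx pats s)) b

theorem pvKmin_nil (pats : List String) (b : Nat) : pvKmin pats b [] = b := rfl

theorem pvKmin_cons (pats : List String) (b : Nat) (s : String) (t : List String) :
    pvKmin pats b (s :: t) = pvKmin pats (min b (pvMIdx pats s)) t := rfl

theorem pvKmin_le (pats : List String) (l : List String) : ∀ b, pvKmin pats b l ≤ b := by
  induction l with
  | nil => intro b; simp [pvKmin_nil]
  | cons s t ih =>
      intro b
      calc pvKmin pats b (s :: t) = pvKmin pats (min b (pvMIdx pats s)) t := pvKmin_cons ..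
        _ ≤ min b (pvMIdx pats s) := ih _
        _ ≤ b := Nat.min_le_left ..

theorem pvKmin_le_of_mem (pats : List String) (l : List String) (x : String) (hx : x ∈ l) :
    ∀ b, pvKmin pats b l ≤ pvMIdx pats x := by
  induction l with
  | nil => cases hx
  | cons s t ih =>
      intro b
      rcases List.mem_cons.mp hx with h | h
      · subst h
        calc pvKmin pats b (x :: t) = pvKmin pats (min b (pvMIdx pats x)) t := pvKmin_cons ..
          _ ≤ min b (pvMIdx pats x) := pvKmin_le ..
          _ ≤ pvMIdx pats x := Nat.min_le_right ..
      · exact pvKmin_cons .. ▸ ih h _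

-- find? congruence for predicates equal on members
theorem pvFind?_congr_mem {α : Type} (l : List α) (p q : α → Bool)
    (h : ∀ x ∈ l, p x = q x) : l.find? p = l.find? q := by
  induction l with
  | nil => rfl
  | cons a t ih =>
      have ha := h a (List.mem_cons_self ..)
      simp only [List.find?_cons, ha, ih (fun x hx => h x (List.mem_cons_of_mem _ hx))]

-- shifting every value (and the seed) by one shifts the running minimum by one
theorem pvKmin_shift (p : String) (ps : List String) (l : List String)
    (h : ∀ s ∈ l, PySem.Str.endswith s p = false) :
    ∀ b, pvKmin (p :: ps) (b + 1) l = pvKmin ps b l + 1 := by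
  induction l with
  | nil => intro b; rfl
  | cons s t ih =>
      intro b
      have hs : pvMIdx (p :: ps) s = pvMIdx ps s + 1 := by
        simp only [pvMIdx, List.findIdx_cons, h s (List.mem_cons_self ..), cond_false]
      rw [pvKmin_cons, pvKmin_cons, hs,
        show min (b + 1) (pvMIdx ps s + 1) = min b (pvMIdx ps s) + 1 by omega,
        ih (fun x hx => h x (List.mem_cons_of_mem _ hx))]

-- characterisation of B's fold
theorem pvFoldB_char (pats : List String) (l : List String) :
    ∀ (b : Nat) (bp : Option String),
    l.foldl (fun (acc : Nat × Option String) s =>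
        if pvMIdx pats s < acc.1 then (pvMIdx pats s, some s) else acc) (b, bp)
    = (pvKmin pats b l,
       if pvKmin pats b l < b then l.find? (fun s => pvMIdx pats s = pvKmin pats b l) else bp) := by
  induction l with
  | nil => intro b bp; simp [pvKmin_nil]
  | cons s t ih =>
      intro b bp
      rw [List.foldl_cons]
      by_cases hi : pvMIdx pats s < b
      · simp only [if_pos hi]
        rw [ih]
        have hK : pvKmin pats b (s :: t) = pvKmin pats (pvMIdx pats s) t := by
          rw [pvKmin_cons, Nat.min_eq_right (Nat.le_of_lt hi)]
        have hKle : pvKmin pats (pvMIdx pats s) t ≤ pvMIdx pats s := pvKmin_le ..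
        by_cases hEq : pvKmin pats (pvMIdx pats s) t = pvMIdx pats s
        · rw [hK, hEq, if_neg (Nat.lt_irrefl _), if_pos hi,
            List.find?_cons_of_pos (by simp)]
        · have hlt : pvKmin pats (pvMIdx pats s) t < pvMIdx pats s :=
            Nat.lt_of_le_of_ne hKle hEq
          rw [hK, if_pos hlt, if_pos (Nat.lt_trans hlt hi),
            List.find?_cons_of_neg (by simp only [decide_eq_true_eq]; omega)]
      · simp only [if_neg hi]
        rw [ih]
        have hb : pvKmin pats b (s :: t) = pvKmin pats b t := by
          rw [pvKmin_cons, Nat.min_eq_left (Nat.le_of_not_lt hi)]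
        rw [hb]
        by_cases hlt : pvKmin pats b t < b
        · rw [if_pos hlt, if_pos hlt,
            List.find?_cons_of_neg (by simp only [decide_eq_true_eq]; omega)]
        · rw [if_neg hlt, if_neg hlt]

-- A's inner loop is find? over the mapped paths
theorem pvScanFilesA_eq (p : String) (files : List (List (String × String))) :
    pvScanFilesA files p
      = (files.map pvPath).find? (fun s => PySem.Str.endswith s p) := by
  induction files with
  | nil => rfl
  | cons f fs ih =>
      show (if PySem.Str.endswith (pvPath f) p = true then some (pvPath f)
            else pvScanFilesA fs p)
          = ((pvPath f :: fs.map pvPath).find? (fun s => PySem.Str.endswith s p))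
      cases h : PySem.Str.endswith (pvPath f) p
      · rw [if_neg (by simp), List.find?_cons_of_neg (by simpa using h), ih]
      · rw [if_pos rfl, List.find?_cons_of_pos (by simpa using h)]

-- characterisation of A's pattern-major scan
theorem pvScanA_char (pats : List String) (files : List (List (String × String))) :
    pvScanPatternsA pats files
      = (if pvKmin pats pats.length (files.map pvPath) < pats.length
         then (files.map pvPath).find?
                (fun s => pvMIdx pats s = pvKmin pats pats.length (files.map pvPath))
         else none) := by
  induction pats with
  | nil =>
      simp only [List.length_nil]
      rw [if_neg (Nat.not_lt_zero _)]
      rfl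
  | cons p ps ih =>
      simp only [pvScanPatternsA, pvScanFilesA_eq]
      set P := files.map pvPath with hP
      cases hfind : P.find? (fun s => PySem.Str.endswith s p) with
      | some s₀ =>
          have hs₀ : PySem.Str.endswith s₀ p = true := List.find?_some (p := fun s => PySem.Str.endswith s p) hfind
          have hmem : s₀ ∈ P := List.mem_of_find?_eq_some hfind
          have hm0 : pvMIdx (p :: ps) s₀ = 0 := by
            simp only [pvMIdx, List.findIdx_cons, hs₀, cond_true]
          have hK0 : pvKmin (p :: ps) (p :: ps).length P = 0 := by
            have := pvKmin_le_of_mem (p :: ps) P s₀ hmem (p :: ps).length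
            omega
          rw [hK0]
          rw [if_pos (by simp)]
          rw [pvFind?_congr_mem P _ (fun s => PySem.Str.endswith s p)
              (by intro x _
                  cases h : PySem.Str.endswith x p <;>
                    simp only [pvMIdx, List.findIdx_cons, h, cond_true, cond_false] <;> simp)]
          exact hfind.symm
      | none =>
          have hno : ∀ s ∈ P, PySem.Str.endswith s p = false := by
            intro s hs
            have := List.find?_eq_none.mp hfind s hs
            simpa using this
          have hshift : pvKmin (p :: ps) (ps.length + 1) P = pvKmin ps ps.length P + 1 :=
            pvKmin_shift p ps P hno ps.length
          rw [ih]
          simp only [List.length_cons, hshift]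
          by_cases hlt : pvKmin ps ps.length P < ps.length
          · rw [if_pos hlt, if_pos (by omega : pvKmin ps ps.length P + 1 < ps.length + 1)]
            apply pvFind?_congr_mem
            intro x hx
            have hx1 : pvMIdx (p :: ps) x = pvMIdx ps x + 1 := by
              simp only [pvMIdx, List.findIdx_cons, hno x hx, cond_false]
            rw [hx1]
            exact decide_eq_decide.mpr (by omega)
          · rw [if_neg hlt,
              if_neg (by omega : ¬ (pvKmin ps ps.length P + 1 < ps.length + 1))]

-- the generic equivalence, for any pattern list
theorem pvMainGeneric (pats : List String) (files : List (List (String × String))) :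
    (match pvScanPatternsA pats files with
     | some s => s
     | none => match pats with
               | p :: _ => p
               | [] => "main.py")
    = (match (files.foldl (fun (acc : Nat × Option String) f =>
          let path := (PySem.Dict.mk f).getD "file_path" ""
          let i := pats.findIdx (fun p => PySem.Str.endswith path p)
          if i < acc.1 then (i, some path) else acc) (pats.length, none)).2 with
       | some s => s
       | none => match pats with
                 | p :: _ => p
                 | [] => "main.py") := by
  have hfold : files.foldl (fun (acc : Nat × Option String) f =>
          let path := (PySem.Dict.mk f).getD "file_path" ""
          let i := pats.findIdx (fun p => PySem.Str.endswith path p)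
          if i < acc.1 then (i, some path) else acc) (pats.length, none)
      = (files.map pvPath).foldl (fun (acc : Nat × Option String) s =>
          if pvMIdx pats s < acc.1 then (pvMIdx pats s, some s) else acc) (pats.length, none) := by
    rw [List.foldl_map]; rfl
  rw [hfold, pvFoldB_char, pvScanA_char]

-- ===== VERDICT (by name: the statement is the Claim_ definition above) =====
theorem find_main_file_py_spec : Claim_equal_find_main_file_py := by
  intro files language _
  show find_main_file_py files language = find_main_file_py_alt files language
  simp only [find_main_file_py, find_main_file_py_alt]
  exact pvMainGeneric _ files
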